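-- pv_equiv track=rewrite | github.com/meinjens/cstatsentry | backend/app/services/leetify_api.py | extract_teammates
-- ===== SOURCE A (Python) =====
-- from typing import Dict, List, Optional, Any
--
-- def extract_teammates(match_data: Dict, user_steam_id: str) -> List[str]:
--     """Extract teammate Steam IDs from match data"""
--     user_team = None
--     teammates = []
--
--     # Find user's team
--     for player in match_data.get("players", []):
--         if player.get("steamId") == user_steam_id:
--             user_team = player.get("team")
--             break
--
--     if not user_team:
--         return teammates
--
--     # Get all teammates (same team, different steam_id)
--     for player in match_data.get("players", []):
--         if (player.get("team") == user_team and
--             player.get("steamId") != user_steam_id):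
--             teammates.append(player.get("steamId"))
--
--     return teammates
-- ===== SOURCE B (Python) =====
-- def extract_teammates(match_data, user_steam_id):
--     """Extract teammate Steam IDs from match data (single-pass grouping)."""
--     groups = {}
--     found = False
--     user_team = None
--     for player in match_data.get("players", []):
--         sid = player.get("steamId")
--         team = player.get("team")
--         groups.setdefault(team, []).append(sid)
--         if not found and sid == user_steam_id:
--             found = True
--             user_team = team
--     if not user_team:
--         return []
--     return [s for s in groups[user_team] if s != user_steam_id]
-- ===== Notes on version B (the rewrite author's own statement) =====
-- stated objective: alternative
-- what changed: Replaces A's find-then-rescan (two passes over the players list) by a single pass that groups steamIds by team in a dict while capturing the user's team, followed by one dict lookup and a comprehension.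
import Mathlib
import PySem

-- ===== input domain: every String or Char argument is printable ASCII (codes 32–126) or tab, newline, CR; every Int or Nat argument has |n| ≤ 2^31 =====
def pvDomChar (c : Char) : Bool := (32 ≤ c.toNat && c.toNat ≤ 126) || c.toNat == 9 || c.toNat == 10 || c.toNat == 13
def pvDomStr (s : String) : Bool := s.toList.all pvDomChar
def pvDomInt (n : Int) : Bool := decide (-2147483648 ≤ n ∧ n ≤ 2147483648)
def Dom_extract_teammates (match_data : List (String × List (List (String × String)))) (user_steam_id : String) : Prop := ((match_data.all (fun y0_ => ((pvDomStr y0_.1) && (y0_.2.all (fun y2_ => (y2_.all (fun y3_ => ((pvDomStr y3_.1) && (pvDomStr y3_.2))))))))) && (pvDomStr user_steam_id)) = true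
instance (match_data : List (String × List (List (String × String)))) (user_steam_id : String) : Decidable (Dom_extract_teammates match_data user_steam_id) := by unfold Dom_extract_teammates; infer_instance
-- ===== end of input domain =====

-- B replaces A's find-then-rescan (two passes) by one grouping pass plus a dict lookup; objective: alternative decomposition.

-- ===== PORT A =====
-- first loop of A: find the user's team, breaking at the first matching steamId
-- (returns none both when no player matches and when the matching player has no "team" key;
--  A returns [] in either case, and also when the team is the falsy "")
def pvFindTeam (user_steam_id : String) : List (List (String × String)) → Option String
  | [] => none
  | p :: rest =>
    if PySem.Dict.get? ⟨p⟩ "steamId" == some user_steam_id then PySem.Dict.get? ⟨p⟩ "team"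
    else pvFindTeam user_steam_id rest

def extract_teammates (match_data : List (String × List (List (String × String)))) (user_steam_id : String) : List String :=
  let players := PySem.Dict.getD ⟨match_data⟩ "players" []
  match pvFindTeam user_steam_id players with
  | none => []          -- `not user_team` (user_team is None)
  | some t =>
    if t == "" then []  -- `not user_team` (falsy empty string)
    else
      -- second loop: append player.get("steamId") for same team, different steamId.
      -- `.getD ""` is only reached outside Pre_ (Python appends None there, not a str).
      players.foldl (fun acc p =>
        if PySem.Dict.get? ⟨p⟩ "team" == some t && !(PySem.Dict.get? ⟨p⟩ "steamId" == some user_steam_id)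
        then acc ++ [(PySem.Dict.get? ⟨p⟩ "steamId").getD ""] else acc) []

-- ===== PORT B =====
-- one step of B's single loop: group sid by team, capture user_team at the first matching sid
def pvBStep (user_steam_id : String)
    (st : PySem.Dict (Option String) (List (Option String)) × Bool × Option String)
    (p : List (String × String)) :
    PySem.Dict (Option String) (List (Option String)) × Bool × Option String :=
  -- groups.setdefault(team, []).append(sid) is Dict.modify; the flag freezes user_team at the first hit
  if !st.2.1 && PySem.Dict.get? ⟨p⟩ "steamId" == some user_steam_id then
    (PySem.Dict.modify st.1 (PySem.Dict.get? ⟨p⟩ "team") [] (· ++ [PySem.Dict.get? ⟨p⟩ "steamId"]), true, PySem.Dict.get? ⟨p⟩ "team")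
  else
    (PySem.Dict.modify st.1 (PySem.Dict.get? ⟨p⟩ "team") [] (· ++ [PySem.Dict.get? ⟨p⟩ "steamId"]), st.2.1, st.2.2)

def extract_teammates_alt (match_data : List (String × List (List (String × String)))) (user_steam_id : String) : List String :=
  let players := PySem.Dict.getD ⟨match_data⟩ "players" []
  let st := players.foldl (pvBStep user_steam_id) (PySem.Dict.empty, false, none)
  match st.2.2 with
  | none => []
  | some t =>
    if t == "" then []
    else
      -- [s for s in groups[user_team] if s != user_steam_id]; `.getD ""` only reached outside Pre_
      ((PySem.Dict.getD st.1 (some t) []).filter (fun s => !(s == some user_steam_id))).map (fun s => s.getD "")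

-- ===== PRECONDITION & SPEC =====
-- Pre_ excludes inputs where a teammate dict (same team as the user, no "steamId" key) would make
-- A append None, i.e. return a list that is not a list[str]; B does the same there.
def Pre_extract_teammates (match_data : List (String × List (List (String × String)))) (user_steam_id : String) : Prop :=
  ∀ p ∈ PySem.Dict.getD (⟨match_data⟩ : PySem.Dict String (List (List (String × String)))) "players" [],
    (((PySem.Dict.getD (⟨match_data⟩ : PySem.Dict String (List (List (String × String)))) "players" []).find?
        (fun q => PySem.Dict.get? ⟨q⟩ "steamId" == some user_steam_id)).map
        (fun q => PySem.Dict.get? ⟨q⟩ "team") = some (PySem.Dict.get? ⟨p⟩ "team") ∧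
      PySem.Dict.get? ⟨p⟩ "team" ≠ none ∧ PySem.Dict.get? ⟨p⟩ "team" ≠ some "") →
    (PySem.Dict.get? ⟨p⟩ "steamId").isSome
instance (match_data : List (String × List (List (String × String)))) (user_steam_id : String) : Decidable (Pre_extract_teammates match_data user_steam_id) := by unfold Pre_extract_teammates; infer_instance

def pvWitness_extract_teammates : (List (String × List (List (String × String)))) × String :=
  ([("players", [[("steamId", "u1"), ("team", "A")], [("steamId", "u2"), ("team", "A")], [("steamId", "u3"), ("team", "B")]])], "u1")

def Spec_extract_teammates (match_data : List (String × List (List (String × String)))) (user_steam_id : String) (out : List String) : Prop := out = extract_teammates_alt match_data user_steam_id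
instance (match_data : List (String × List (List (String × String)))) (user_steam_id : String) (out : List String) : Decidable (Spec_extract_teammates match_data user_steam_id out) := by unfold Spec_extract_teammates; infer_instance

-- ===== CLAIM (what is proved, stated in full; the proofs are below) =====
def Claim_equal_extract_teammates : Prop := ∀ (match_data : List (String × List (List (String × String)))) (user_steam_id : String), Dom_extract_teammates match_data user_steam_id → Pre_extract_teammates match_data user_steam_id → Spec_extract_teammates match_data user_steam_id (extract_teammates match_data user_steam_id)

-- ===== LEMMAS AND PROOFS =====

-- the groups component of B's fold is the pure grouping fold (the flag/team part never feeds back into it)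
theorem pvBStep_fst (user_steam_id : String) (ps : List (List (String × String)))
    (st : PySem.Dict (Option String) (List (Option String)) × Bool × Option String) :
    (ps.foldl (pvBStep user_steam_id) st).1 =
      ps.foldl (fun d p => PySem.Dict.modify d (PySem.Dict.get? ⟨p⟩ "team") []
        (· ++ [PySem.Dict.get? ⟨p⟩ "steamId"])) st.1 := by
  induction ps generalizing st with
  | nil => rfl
  | cons p rest ih =>
    simp only [List.foldl_cons, ih]
    unfold pvBStep
    split <;> rfl

-- once the flag is set, the (flag, user_team) component is frozen
theorem pvBStep_snd_frozen (user_steam_id : String) (ps : List (List (String × String)))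
    (d : PySem.Dict (Option String) (List (Option String))) (u : Option String) :
    (ps.foldl (pvBStep user_steam_id) (d, true, u)).2 = (true, u) := by
  induction ps generalizing d with
  | nil => rfl
  | cons p rest ih => simpa [pvBStep] using ih _

-- B's captured user_team equals A's first-pass result
theorem pvBStep_userTeam (user_steam_id : String) (ps : List (List (String × String)))
    (d : PySem.Dict (Option String) (List (Option String))) :
    (ps.foldl (pvBStep user_steam_id) (d, false, none)).2.2 = pvFindTeam user_steam_id ps := by
  induction ps generalizing d with
  | nil => rfl
  | cons p rest ih =>
    simp only [List.foldl_cons, pvFindTeam]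
    by_cases h : (PySem.Dict.get? ⟨p⟩ "steamId" == some user_steam_id) = true
    · simp only [pvBStep, h]
      simp [pvBStep_snd_frozen]
    · simp only [pvBStep, h]
      simpa using ih _

-- the grouped list at key t is the filtered steamId list, in player order
theorem pvGroups_getD (user_steam_id : String) (ps : List (List (String × String))) (t : Option String)
    (st : PySem.Dict (Option String) (List (Option String)) × Bool × Option String) :
    PySem.Dict.getD (ps.foldl (pvBStep user_steam_id) st).1 t [] =
      PySem.Dict.getD st.1 t [] ++
        (ps.filter (fun p => PySem.Dict.get? ⟨p⟩ "team" == t)).map (fun p => PySem.Dict.get? ⟨p⟩ "steamId") := by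
  rw [pvBStep_fst]
  have := PySem.Dict.getD_foldl_modify_append
    (l := ps.map (fun p => (PySem.Dict.get? (⟨p⟩ : PySem.Dict String String) "team",
                            PySem.Dict.get? (⟨p⟩ : PySem.Dict String String) "steamId")))
    (d := st.1) (c := t)
  rw [List.foldl_map] at this
  rw [this, List.filter_map, List.map_map]
  rfl

theorem extract_teammates_spec' (match_data : List (String × List (List (String × String)))) (user_steam_id : String) :
    extract_teammates match_data user_steam_id = extract_teammates_alt match_data user_steam_id := by
  unfold extract_teammates extract_teammates_alt
  simp only [pvBStep_userTeam]
  cases h : pvFindTeam user_steam_id (PySem.Dict.getD ⟨match_data⟩ "players" []) with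
  | none => rfl
  | some t =>
    by_cases ht : (t == "") = true
    · simp [ht]
    · simp only [ht, Bool.false_eq_true, if_false]
      rw [pvGroups_getD]
      simp only [PySem.Dict.getD_empty, List.nil_append]
      rw [PySem.List.foldl_append_if, List.filter_map, List.map_map, List.nil_append,
        List.filter_filter]
      simp [Function.comp_def, Bool.and_comm]

-- ===== VERDICT (by name: the statement is the Claim_ definition above) =====
theorem extract_teammates_spec : Claim_equal_extract_teammates := by
  intro match_data user_steam_id _ _
  exact extract_teammates_spec' match_data user_steam_id
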